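-- pv_equiv track=rewrite | github.com/bpdarlyn/best-position-for-team | index.py | build_table_position
-- ===== SOURCE A (Python) =====
-- def build_table_position(start_position, results):
--     new_table_position = start_position.copy()
--     for r in results:
--         team_a, team_b, result = r
--         values_team_a = new_table_position.get(team_a)
--         values_team_b = new_table_position.get(team_b)
--         acu_pts_a = values_team_a[-1]
--         acu_pts_b = values_team_b[-1]
--         if result == 0:
--             # Empate
--             acu_pts_a += 1
--             acu_pts_b += 1
--         if result == 1:
--             # Gana Team A
--             acu_pts_a += 3
--         if result == 2:
--             # Gana Team B
--             acu_pts_b += 3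
--
--         new_table_position[team_a] = (values_team_a[0], values_team_a[1], acu_pts_a)
--         new_table_position[team_b] = (values_team_b[0], values_team_b[1], acu_pts_b)
--
--     return order_position_table(new_table_position)
--
-- def order_position_table(position_table):
--     sorted_values = sorted(position_table.items(), key=lambda x: x[1][2], reverse=True)
--     return dict(sorted_values)
-- ===== SOURCE B (Python) =====
-- def build_table_position(start_position, results):
--     # Divide and conquer: reduce the match list to a single dict of point
--     # gains per team (merging partial tallies), then apply it to the table
--     # in one pass and sort once.
--     def tally(rs):
--         if not rs:
--             return {}
--         if len(rs) == 1:
--             team_a, team_b, result = rs[0]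
--             gain_a, gain_b = (1, 1) if result == 0 else \
--                              (3, 0) if result == 1 else \
--                              (0, 3) if result == 2 else (0, 0)
--             return {team_a: gain_a, team_b: gain_b}
--         mid = len(rs) // 2
--         merged = tally(rs[:mid])
--         for team, gain in tally(rs[mid:]).items():
--             merged[team] = merged.get(team, 0) + gain
--         return merged
--
--     table = dict(start_position)
--     for team, gain in tally(list(results)).items():
--         first, second, points = table[team]
--         table[team] = (first, second, points + gain)
--     return dict(sorted(table.items(), key=lambda kv: kv[1][2], reverse=True))
-- ===== Notes on version B (the rewrite author's own statement) =====
-- stated objective: alternative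
-- what changed: A walks the results once, mutating the running table dict in place per match; B never touches the table while reading results: it reduces the match list by divide and conquer into a single dict of point gains (leaf dicts merged pairwise), then applies that gain dict to the table in one pass and sorts once.
import Mathlib
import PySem

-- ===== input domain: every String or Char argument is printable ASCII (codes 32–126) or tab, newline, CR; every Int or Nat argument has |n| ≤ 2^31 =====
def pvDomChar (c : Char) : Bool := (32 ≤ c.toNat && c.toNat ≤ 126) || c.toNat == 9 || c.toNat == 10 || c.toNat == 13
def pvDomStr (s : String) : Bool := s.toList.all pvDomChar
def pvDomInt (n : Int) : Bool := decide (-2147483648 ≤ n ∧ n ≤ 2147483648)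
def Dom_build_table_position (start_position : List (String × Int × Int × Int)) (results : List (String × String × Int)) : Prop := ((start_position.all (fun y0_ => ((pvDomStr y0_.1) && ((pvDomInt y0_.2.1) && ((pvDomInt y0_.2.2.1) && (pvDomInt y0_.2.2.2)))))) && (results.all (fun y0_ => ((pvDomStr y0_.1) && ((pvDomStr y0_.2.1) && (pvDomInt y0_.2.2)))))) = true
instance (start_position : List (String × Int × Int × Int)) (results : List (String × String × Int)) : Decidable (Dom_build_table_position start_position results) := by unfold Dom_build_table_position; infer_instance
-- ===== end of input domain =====

-- B replaces A's in-place per-match mutation of the table by a divide-and-conquer tally of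
-- point gains (merged dicts), one application pass and one sort (alternative decomposition).

-- ===== PORT A =====
-- order_position_table: dict(sorted(items, key=lambda x: x[1][2], reverse=True));
-- the sorted list carries the dict's unique keys, so dict() of it is the list itself (exact here).
def order_position_table (position_table : PySem.Dict String (Int × Int × Int)) : List (String × Int × Int × Int) :=
  PySem.List.sorted position_table.items (fun x => x.2.2.2) true

-- the loop body of A; state none = the Python has raised (values_team_x is None, [-1] raises TypeError)
def pvStepA (acc : Option (PySem.Dict String (Int × Int × Int))) (r : String × String × Int) :
    Option (PySem.Dict String (Int × Int × Int)) :=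
  match acc with
  | none => none
  | some d =>
    match d.get? r.1, d.get? r.2.1 with
    | some values_team_a, some values_team_b =>
      let acu_pts_a0 := values_team_a.2.2
      let acu_pts_b0 := values_team_b.2.2
      let acu_pts_a1 := if r.2.2 = 0 then acu_pts_a0 + 1 else acu_pts_a0
      let acu_pts_b1 := if r.2.2 = 0 then acu_pts_b0 + 1 else acu_pts_b0
      let acu_pts_a2 := if r.2.2 = 1 then acu_pts_a1 + 3 else acu_pts_a1
      let acu_pts_b2 := if r.2.2 = 2 then acu_pts_b1 + 3 else acu_pts_b1
      some ((d.insert r.1 (values_team_a.1, values_team_a.2.1, acu_pts_a2)).insert r.2.1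
            (values_team_b.1, values_team_b.2.1, acu_pts_b2))
    | _, _ => none

def build_table_position (start_position : List (String × Int × Int × Int)) (results : List (String × String × Int)) : List (String × Int × Int × Int) :=
  match results.foldl pvStepA (some ⟨start_position⟩) with
  | some new_table_position => order_position_table new_table_position
  | none => []   -- Python raised TypeError here; outside Pre_

-- ===== PORT B =====
-- merged[team] = merged.get(team, 0) + gain (the body of Source B's merge loop)
def pvMergeStep (merged : PySem.Dict String Int) (kv : String × Int) : PySem.Dict String Int :=
  merged.insert kv.1 (merged.getD kv.1 0 + kv.2)

-- Source B's helper tally: divide-and-conquer reduction of the match list to a gain dict.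
-- Structural fuel (= rs.length at the call, always sufficient: each half is strictly
-- shorter) only makes the halving recursion structural; it never changes the computation.
def pvTallyGo (fuel : Nat) (rs : List (String × String × Int)) : PySem.Dict String Int :=
  match fuel with
  | 0 => PySem.Dict.empty   -- unreachable for fuel ≥ rs.length
  | fuel + 1 =>
    if rs = [] then PySem.Dict.empty
    else if rs.length = 1 then
      match rs with
      | [] => PySem.Dict.empty
      | r :: _ =>
        let gains : Int × Int :=
          if r.2.2 = 0 then (1, 1) else if r.2.2 = 1 then (3, 0)
          else if r.2.2 = 2 then (0, 3) else (0, 0)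
        -- {team_a: gain_a, team_b: gain_b}: second entry overwrites the first if the keys coincide
        (PySem.Dict.empty.insert r.1 gains.1).insert r.2.1 gains.2
    else
      let mid := rs.length / 2
      ((pvTallyGo fuel (rs.drop mid)).items).foldl pvMergeStep (pvTallyGo fuel (rs.take mid))

def pvTally (rs : List (String × String × Int)) : PySem.Dict String Int :=
  pvTallyGo rs.length rs

-- the body of Source B's application loop; state none = the Python has raised (KeyError)
def pvApplyStep (acc : Option (PySem.Dict String (Int × Int × Int))) (kv : String × Int) :
    Option (PySem.Dict String (Int × Int × Int)) :=
  match acc with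
  | none => none
  | some table =>
    match table.get? kv.1 with
    | some v => some (table.insert kv.1 (v.1, v.2.1, v.2.2 + kv.2))
    | none => none   -- Python raised KeyError here; outside Pre_

def build_table_position_alt (start_position : List (String × Int × Int × Int)) (results : List (String × String × Int)) : List (String × Int × Int × Int) :=
  match ((pvTally results).items).foldl pvApplyStep (some ⟨start_position⟩) with
  | some table =>
    -- dict(sorted(table.items(), key=lambda kv: kv[1][2], reverse=True)): unique keys, the list itself
    PySem.List.sorted table.items (fun kv => kv.2.2.2) true
  | none => []   -- Python raised KeyError here; outside Pre_

-- ===== PRECONDITION & SPEC =====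
-- Pre_ excludes (i) duplicate keys in the start_position association list (a Python dict
-- cannot carry them; which entry survives is a representation artefact), and (ii) results
-- naming a team absent from the table, where A raises TypeError ('NoneType' is not
-- subscriptable) and B raises KeyError.
def Pre_build_table_position (start_position : List (String × Int × Int × Int)) (results : List (String × String × Int)) : Prop :=
  (start_position.map Prod.fst).Nodup ∧
  ∀ r ∈ results, r.1 ∈ start_position.map Prod.fst ∧ r.2.1 ∈ start_position.map Prod.fst
instance (start_position : List (String × Int × Int × Int)) (results : List (String × String × Int)) : Decidable (Pre_build_table_position start_position results) := by unfold Pre_build_table_position; infer_instance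

def pvWitness_build_table_position : (List (String × Int × Int × Int)) × (List (String × String × Int)) :=
  ([("A", 1, 2, 3), ("B", 4, 5, 6)], [("A", "B", 1), ("B", "A", 0)])

def Spec_build_table_position (start_position : List (String × Int × Int × Int)) (results : List (String × String × Int)) (out : List (String × Int × Int × Int)) : Prop := out = build_table_position_alt start_position results
instance (start_position : List (String × Int × Int × Int)) (results : List (String × String × Int)) (out : List (String × Int × Int × Int)) : Decidable (Spec_build_table_position start_position results out) := by unfold Spec_build_table_position; infer_instance

-- ===== CLAIM =====
def Claim_equal_build_table_position : Prop := ∀ (start_position : List (String × Int × Int × Int)) (results : List (String × String × Int)), Dom_build_table_position start_position results → Pre_build_table_position start_position results → Spec_build_table_position start_position results (build_table_position start_position results)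

-- ===== LEMMAS AND PROOFS =====

-- points contributed by one result r to team k (the second write/entry wins when the teams coincide)
def pvPoints (k : String) (r : String × String × Int) : Int :=
  if k = r.2.1 then (if r.2.2 = 0 then 1 else if r.2.2 = 2 then 3 else 0)
  else if k = r.1 then (if r.2.2 = 0 then 1 else if r.2.2 = 1 then 3 else 0)
  else 0

-- total points contributed by a result list to team k
def pvDtot (rs : List (String × String × Int)) (k : String) : Int :=
  (rs.map (fun r => pvPoints k r)).sum

-- total gain recorded for key k in an association list of (team, gain) pairs
def pvSumKey (ds : List (String × Int)) (k : String) : Int :=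
  (ds.map (fun p => if p.1 = k then p.2 else 0)).sum

-- a table row with its points shifted by a delta function D
def pvGf (D : String → Int) (kv : String × Int × Int × Int) : String × Int × Int × Int :=
  (kv.1, kv.2.1, kv.2.2.1, kv.2.2.2 + D kv.1)

theorem pvGetQ_mk_map (sp : List (String × Int × Int × Int)) (D : String → Int) (k : String) :
    (PySem.Dict.mk (sp.map (pvGf D))).get? k
      = ((PySem.Dict.mk sp).get? k).map (fun v => (v.1, v.2.1, v.2.2 + D k)) := by
  induction sp with
  | nil => simp [PySem.Dict.get?]
  | cons p sp ih =>
    simp only [List.map_cons, pvGf]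
    rw [PySem.Dict.get?_mk_cons, PySem.Dict.get?_mk_cons]
    by_cases h : p.1 = k
    · subst h; simp
    · simp [h, ih]

theorem pvKeys_mk_map (sp : List (String × Int × Int × Int)) (D : String → Int) :
    (PySem.Dict.mk (sp.map (pvGf D))).keys = sp.map Prod.fst := by
  simp [PySem.Dict.keys, List.map_map, Function.comp, pvGf]

theorem pvGet_unique (sp : List (String × Int × Int × Int)) (hnd : (sp.map Prod.fst).Nodup)
    {p : String × Int × Int × Int} (hp : p ∈ sp) :
    (PySem.Dict.mk sp).get? p.1 = some p.2 := by
  apply PySem.Dict.get?_of_mem_items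
  · exact hp
  · simpa [PySem.Dict.keys] using hnd

theorem pvStepA_map (sp : List (String × Int × Int × Int)) (hnd : (sp.map Prod.fst).Nodup)
    (r : String × String × Int)
    (ha : r.1 ∈ sp.map Prod.fst) (hb : r.2.1 ∈ sp.map Prod.fst) (D : String → Int) :
    pvStepA (some (PySem.Dict.mk (sp.map (pvGf D)))) r
      = some (PySem.Dict.mk (sp.map (pvGf (fun k => D k + pvPoints k r)))) := by
  obtain ⟨pa, hpa, hpa1⟩ : ∃ p ∈ sp, p.1 = r.1 := by
    obtain ⟨p, hp, h1⟩ := List.mem_map.mp ha; exact ⟨p, hp, h1⟩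
  obtain ⟨pb, hpb, hpb1⟩ : ∃ p ∈ sp, p.1 = r.2.1 := by
    obtain ⟨p, hp, h1⟩ := List.mem_map.mp hb; exact ⟨p, hp, h1⟩
  have hga : (PySem.Dict.mk sp).get? r.1 = some pa.2 := hpa1 ▸ pvGet_unique sp hnd hpa
  have hgb : (PySem.Dict.mk sp).get? r.2.1 = some pb.2 := hpb1 ▸ pvGet_unique sp hnd hpb
  have hca : (PySem.Dict.mk (sp.map (pvGf D))).contains r.1 = true := by
    rw [PySem.Dict.contains_iff_mem_keys, pvKeys_mk_map]; exact ha
  have hcb : (PySem.Dict.mk (sp.map (pvGf D))).contains r.2.1 = true := by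
    rw [PySem.Dict.contains_iff_mem_keys, pvKeys_mk_map]; exact hb
  unfold pvStepA
  dsimp only
  rw [pvGetQ_mk_map, pvGetQ_mk_map, hga, hgb]
  dsimp only [Option.map_some]
  congr 1
  apply PySem.Dict.ext
  rw [PySem.Dict.items_insert_of_contains _ _ (by
        rw [PySem.Dict.contains_insert, hcb]; simp)]
  rw [PySem.Dict.items_insert_of_contains _ _ hca]
  simp only [List.map_map]
  apply List.map_congr_left
  intro p hp
  simp only [Function.comp_apply, pvGf, beq_iff_eq]
  by_cases h2 : p.1 = r.2.1
  · have hpvb : p.2 = pb.2 := by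
      have := pvGet_unique sp hnd hp
      rw [h2, hgb] at this; exact (Option.some_inj.mp this).symm
    by_cases h1 : p.1 = r.1
    · have hr : r.1 = r.2.1 := h1.symm.trans h2
      simp [h1, hr, pvPoints, hpvb, Prod.ext_iff]
      split_ifs <;> omega
    · have hr : ¬ r.2.1 = r.1 := fun h => h1 (h2.trans h)
      simp [h2, hr, pvPoints, hpvb, Prod.ext_iff]
      split_ifs <;> omega
  · by_cases h1 : p.1 = r.1
    · have hpva : p.2 = pa.2 := by
        have := pvGet_unique sp hnd hp
        rw [h1, hga] at this; exact (Option.some_inj.mp this).symm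
      have hr : ¬ r.1 = r.2.1 := fun h => h2 (h1.trans h)
      simp [h1, hr, pvPoints, hpva, Prod.ext_iff]
      split_ifs <;> omega
    · simp [h1, h2, pvPoints]

theorem pvFoldA_map (rs : List (String × String × Int)) (sp : List (String × Int × Int × Int))
    (hnd : (sp.map Prod.fst).Nodup)
    (hr : ∀ r ∈ rs, r.1 ∈ sp.map Prod.fst ∧ r.2.1 ∈ sp.map Prod.fst)
    (D : String → Int) :
    rs.foldl pvStepA (some (PySem.Dict.mk (sp.map (pvGf D))))
      = some (PySem.Dict.mk (sp.map (pvGf (fun k => D k + pvDtot rs k)))) := by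
  induction rs generalizing D with
  | nil =>
    have : (fun k => D k + pvDtot [] k) = D := by funext k; simp [pvDtot]
    simp [this]
  | cons r rs ih =>
    have h := hr r (by simp)
    rw [List.foldl_cons, pvStepA_map sp hnd r h.1 h.2 D,
        ih (fun q hq => hr q (by simp [hq]))]
    have : (fun k => (D k + pvPoints k r) + pvDtot rs k) = fun k => D k + pvDtot (r :: rs) k := by
      funext k; simp [pvDtot]; ring
    rw [this]

-- ---- B side: the tally dict computes pvDtot ----

theorem pvMergeFold_getD (ds : List (String × Int)) (l : PySem.Dict String Int) (k : String) :
    (ds.foldl pvMergeStep l).getD k 0 = l.getD k 0 + pvSumKey ds k := by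
  induction ds generalizing l with
  | nil => simp [pvSumKey]
  | cons p ds ih =>
    rw [List.foldl_cons, ih]
    unfold pvMergeStep
    rw [PySem.Dict.getD_insert]
    by_cases h : k = p.1
    · subst h; simp [pvSumKey]; ring
    · have h' : ¬ p.1 = k := fun hh => h hh.symm
      simp [h, h', pvSumKey]

theorem pvMergeFold_nodup (ds : List (String × Int)) (l : PySem.Dict String Int)
    (h : l.keys.Nodup) : (ds.foldl pvMergeStep l).keys.Nodup := by
  induction ds generalizing l with
  | nil => exact h
  | cons p ds ih => exact ih _ (PySem.Dict.nodup_keys_insert _ _ _ h)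

theorem pvMergeFold_keys_sub (ds : List (String × Int)) (l : PySem.Dict String Int) (k : String)
    (hk : k ∈ (ds.foldl pvMergeStep l).keys) : k ∈ l.keys ∨ k ∈ ds.map Prod.fst := by
  induction ds generalizing l with
  | nil => exact Or.inl hk
  | cons p ds ih =>
    rcases ih _ hk with h | h
    · rcases (PySem.Dict.mem_keys_insert _ _ _ _).mp h with h1 | h1
      · exact Or.inr (by simp [h1])
      · exact Or.inl h1
    · exact Or.inr (by simp [h])

theorem pvSumKey_zero_of_not_mem (ds : List (String × Int)) (k : String)
    (h : k ∉ ds.map Prod.fst) : pvSumKey ds k = 0 := by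
  induction ds with
  | nil => simp [pvSumKey]
  | cons p ds ih =>
    have h1 : ¬ p.1 = k := fun hh => h (by simp [hh])
    have h2 : k ∉ ds.map Prod.fst := fun hh => h (by simp [hh])
    simp [pvSumKey, h1] at *
    exact ih h2

theorem pvSumKey_cons (p : String × Int) (ps : List (String × Int)) (k : String) :
    pvSumKey (p :: ps) k = (if p.1 = k then p.2 else 0) + pvSumKey ps k := by
  simp [pvSumKey]

theorem pvSumKey_mk (ps : List (String × Int)) (k : String)
    (hnd : (ps.map Prod.fst).Nodup) :
    pvSumKey ps k = (PySem.Dict.mk ps).getD k 0 := by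
  induction ps with
  | nil => simp [pvSumKey, PySem.Dict.getD, PySem.Dict.get?]
  | cons p ps ih =>
    rw [List.map_cons] at hnd
    obtain ⟨h1, h2⟩ := List.nodup_cons.mp hnd
    rw [pvSumKey_cons, PySem.Dict.getD_eq_get?_getD, PySem.Dict.get?_mk_cons]
    by_cases h : p.1 = k
    · subst h
      have hz : pvSumKey ps p.1 = 0 := pvSumKey_zero_of_not_mem ps p.1 (by simpa using h1)
      simp [hz]
    · rw [ih h2, PySem.Dict.getD_eq_get?_getD]
      simp [h]

theorem pvSumKey_items (d : PySem.Dict String Int) (hnd : d.keys.Nodup) (k : String) :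
    pvSumKey d.items k = d.getD k 0 := by
  obtain ⟨ps⟩ := d
  exact pvSumKey_mk ps k (by simpa [PySem.Dict.keys, PySem.Dict.items] using hnd)

theorem pvTallyGo_nodup (fuel : Nat) (rs : List (String × String × Int)) :
    (pvTallyGo fuel rs).keys.Nodup := by
  induction fuel generalizing rs with
  | zero => exact PySem.Dict.nodup_keys_empty
  | succ fuel ih =>
    unfold pvTallyGo
    split_ifs with h0 h1
    · exact PySem.Dict.nodup_keys_empty
    · match rs with
      | [] => exact PySem.Dict.nodup_keys_empty
      | r :: _ =>
        exact PySem.Dict.nodup_keys_insert _ _ _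
          (PySem.Dict.nodup_keys_insert _ _ _ PySem.Dict.nodup_keys_empty)
    · exact pvMergeFold_nodup _ _ (ih (rs.take (rs.length / 2)))

theorem pvTally_nodup (rs : List (String × String × Int)) : (pvTally rs).keys.Nodup :=
  pvTallyGo_nodup rs.length rs

theorem pvTallyGo_keys_sub (fuel : Nat) (rs : List (String × String × Int)) (k : String)
    (hk : k ∈ (pvTallyGo fuel rs).keys) : ∃ r ∈ rs, k = r.1 ∨ k = r.2.1 := by
  induction fuel generalizing rs with
  | zero => simp [pvTallyGo, PySem.Dict.keys_empty] at hk
  | succ fuel ih =>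
    unfold pvTallyGo at hk
    split_ifs at hk with h0 h1
    · simp [PySem.Dict.keys_empty] at hk
    · match rs, hk with
      | r :: _, hk =>
        rcases (PySem.Dict.mem_keys_insert _ _ _ _).mp hk with h | h
        · exact ⟨r, by simp, Or.inr h⟩
        · rcases (PySem.Dict.mem_keys_insert _ _ _ _).mp h with h | h
          · exact ⟨r, by simp, Or.inl h⟩
          · simp [PySem.Dict.keys_empty] at h
    · rcases pvMergeFold_keys_sub _ _ _ hk with h | h
      · obtain ⟨r, hr, ho⟩ := ih (rs.take (rs.length / 2)) h
        exact ⟨r, List.mem_of_mem_take hr, ho⟩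
      · have h' : k ∈ (pvTallyGo fuel (rs.drop (rs.length / 2))).keys := by
          simpa [PySem.Dict.keys] using h
        obtain ⟨r, hr, ho⟩ := ih (rs.drop (rs.length / 2)) h'
        exact ⟨r, List.mem_of_mem_drop hr, ho⟩

theorem pvTally_keys_sub (rs : List (String × String × Int)) (k : String)
    (hk : k ∈ (pvTally rs).keys) : ∃ r ∈ rs, k = r.1 ∨ k = r.2.1 :=
  pvTallyGo_keys_sub rs.length rs k hk

theorem pvDtot_append (xs ys : List (String × String × Int)) (k : String) :
    pvDtot (xs ++ ys) k = pvDtot xs k + pvDtot ys k := by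
  simp [pvDtot]

theorem pvTallyGo_getD (fuel : Nat) (rs : List (String × String × Int)) (k : String)
    (hlen : rs.length ≤ fuel) : (pvTallyGo fuel rs).getD k 0 = pvDtot rs k := by
  induction fuel generalizing rs with
  | zero =>
    have : rs = [] := by
      cases rs with
      | nil => rfl
      | cons a l => simp at hlen
    subst this; simp [pvTallyGo, pvDtot]
  | succ fuel ih =>
    unfold pvTallyGo
    split_ifs with h0 h1
    · subst h0; simp [pvDtot]
    · match rs, h1 with
      | [r], _ =>
        rw [PySem.Dict.getD_insert, PySem.Dict.getD_insert]
        simp only [PySem.Dict.getD_empty, pvDtot, List.map_cons, List.map_nil, List.sum_cons,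
          List.sum_nil, add_zero, pvPoints]
        split_ifs <;> simp_all
    · have h2 : rs.length ≠ 0 := by simpa [List.length_eq_zero_iff] using h0
      have ht : (rs.take (rs.length / 2)).length ≤ fuel := by
        simp only [List.length_take]; omega
      have hd : (rs.drop (rs.length / 2)).length ≤ fuel := by
        simp only [List.length_drop]; omega
      rw [pvMergeFold_getD, ih (rs.take (rs.length / 2)) ht,
        pvSumKey_items _ (pvTallyGo_nodup _ _), ih (rs.drop (rs.length / 2)) hd]
      conv_rhs => rw [← List.take_append_drop (rs.length / 2) rs]
      rw [pvDtot_append]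

theorem pvTally_getD (rs : List (String × String × Int)) (k : String) :
    (pvTally rs).getD k 0 = pvDtot rs k :=
  pvTallyGo_getD rs.length rs k le_rfl

-- ---- B side: applying the gain dict shifts the table ----

theorem pvApplyStep_map (sp : List (String × Int × Int × Int)) (hnd : (sp.map Prod.fst).Nodup)
    (p : String × Int) (hp : p.1 ∈ sp.map Prod.fst) (D : String → Int) :
    pvApplyStep (some (PySem.Dict.mk (sp.map (pvGf D)))) p
      = some (PySem.Dict.mk (sp.map (pvGf (fun k => D k + (if p.1 = k then p.2 else 0))))) := by
  obtain ⟨pa, hpa, hpa1⟩ : ∃ q ∈ sp, q.1 = p.1 := by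
    obtain ⟨q, hq, h1⟩ := List.mem_map.mp hp; exact ⟨q, hq, h1⟩
  have hga : (PySem.Dict.mk sp).get? p.1 = some pa.2 := hpa1 ▸ pvGet_unique sp hnd hpa
  have hca : (PySem.Dict.mk (sp.map (pvGf D))).contains p.1 = true := by
    rw [PySem.Dict.contains_iff_mem_keys, pvKeys_mk_map]; exact hp
  unfold pvApplyStep
  dsimp only
  rw [pvGetQ_mk_map, hga]
  dsimp only [Option.map_some]
  congr 1
  apply PySem.Dict.ext
  rw [PySem.Dict.items_insert_of_contains _ _ hca]
  simp only [List.map_map]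
  apply List.map_congr_left
  intro q hq
  simp only [Function.comp_apply, pvGf, beq_iff_eq]
  by_cases h : q.1 = p.1
  · have hqv : q.2 = pa.2 := by
      have := pvGet_unique sp hnd hq
      rw [h, hga] at this; exact (Option.some_inj.mp this).symm
    simp [h, hqv, Prod.ext_iff]
    ring
  · have h' : ¬ p.1 = q.1 := fun hh => h hh.symm
    simp [h, h']

theorem pvApplyFold_map (ds : List (String × Int)) (sp : List (String × Int × Int × Int))
    (hnd : (sp.map Prod.fst).Nodup)
    (hk : ∀ p ∈ ds, p.1 ∈ sp.map Prod.fst) (D : String → Int) :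
    ds.foldl pvApplyStep (some (PySem.Dict.mk (sp.map (pvGf D))))
      = some (PySem.Dict.mk (sp.map (pvGf (fun k => D k + pvSumKey ds k)))) := by
  induction ds generalizing D with
  | nil =>
    have : (fun k => D k + pvSumKey [] k) = D := by funext k; simp [pvSumKey]
    simp [this]
  | cons p ds ih =>
    rw [List.foldl_cons, pvApplyStep_map sp hnd p (hk p (by simp)) D,
        ih (fun q hq => hk q (by simp [hq]))]
    have : (fun k => (D k + (if p.1 = k then p.2 else 0)) + pvSumKey ds k)
        = fun k => D k + pvSumKey (p :: ds) k := by
      funext k; simp [pvSumKey]; ring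
    rw [this]

-- ===== VERDICT =====
theorem build_table_position_spec : Claim_equal_build_table_position := by
  intro sp rs _hdom hpre
  obtain ⟨hnd, hr⟩ := hpre
  unfold Spec_build_table_position build_table_position build_table_position_alt
  have h0 : sp.map (pvGf (fun _ => 0)) = sp := by
    conv_rhs => rw [← List.map_id sp]
    apply List.map_congr_left
    intro p _; simp [pvGf]
  have hA := pvFoldA_map rs sp hnd hr (fun _ => 0)
  rw [h0] at hA
  rw [hA]
  have hk : ∀ p ∈ (pvTally rs).items, p.1 ∈ sp.map Prod.fst := by
    intro p hp
    have hmem : p.1 ∈ (pvTally rs).keys := by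
      simp only [PySem.Dict.keys]; exact List.mem_map_of_mem hp
    obtain ⟨r, hrm, ho⟩ := pvTally_keys_sub rs p.1 hmem
    rcases ho with h | h
    · exact h ▸ (hr r hrm).1
    · exact h ▸ (hr r hrm).2
  have hB := pvApplyFold_map (pvTally rs).items sp hnd hk (fun _ => 0)
  rw [h0] at hB
  rw [hB]
  dsimp only [order_position_table, PySem.Dict.items]
  congr 1
  apply List.map_congr_left
  intro p _
  have : pvSumKey (pvTally rs).items p.1 = pvDtot rs p.1 := by
    rw [pvSumKey_items _ (pvTally_nodup rs), pvTally_getD]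
  simp [pvGf, this]
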